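-- pv_equiv track=rewrite | github.com/withaspirit/FTL-MV-Wiki-Tools | project/wikiWeaponTables.py | formatColumnHeaders
-- ===== SOURCE A (Python) =====
-- dmgTypeSet = {'H', 'S', 'C', 'I'}
--
-- def formatColumnHeaders(columns: list) -> str:
--     # find how many of letters in dmgSet to include (colSpan)
--
--     dmgTypeList = []
--     for column in columns:
--         if column in dmgTypeSet:
--             dmgTypeList.append(column)
--
--     columnList = []
--     dmgSeen = False
--     for column in columns:
--         # skip dmgTypeSet (they go on first row)
--         if column in dmgTypeSet:
--             if dmgSeen == False:
--                 columnList.append(f'colspan="{len(dmgTypeList)}" |Damage')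
--                 dmgSeen = True
--             else:
--                 continue
--         else:
--             columnList.append(f'rowspan="2" |{column}')
--
--     # add second row (column names)
--     columnHeader = '|-\n! ' + '\n! '.join(columnList)
--     # add first row (damage types)
--     columnHeader += '\n|-\n!' + '\n!'.join(dmgTypeList)
--     return columnHeader
-- ===== SOURCE B (Python) =====
-- dmgTypeSet = {'H', 'S', 'C', 'I'}
--
-- def formatColumnHeaders(columns: list) -> str:
--     dmg = [c for c in columns if c in dmgTypeSet]
--     rest = [f'rowspan="2" |{c}' for c in columns if c not in dmgTypeSet]
--     if dmg:
--         k = next(i for i, c in enumerate(columns) if c in dmgTypeSet)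
--         columnList = rest[:k] + [f'colspan="{len(dmg)}" |Damage'] + rest[k:]
--     else:
--         columnList = rest
--     return '|-\n! ' + '\n! '.join(columnList) + '\n|-\n!' + '\n!'.join(dmg)
-- ===== Notes on version B (the rewrite author's own statement) =====
-- stated objective: simpler
-- what changed: Replaces A's stateful two-loop scan (a dmgSeen flag deciding when to emit the Damage cell) with two filter comprehensions and a single splice of the Damage cell at the index of the first damage column.
import Mathlib
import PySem

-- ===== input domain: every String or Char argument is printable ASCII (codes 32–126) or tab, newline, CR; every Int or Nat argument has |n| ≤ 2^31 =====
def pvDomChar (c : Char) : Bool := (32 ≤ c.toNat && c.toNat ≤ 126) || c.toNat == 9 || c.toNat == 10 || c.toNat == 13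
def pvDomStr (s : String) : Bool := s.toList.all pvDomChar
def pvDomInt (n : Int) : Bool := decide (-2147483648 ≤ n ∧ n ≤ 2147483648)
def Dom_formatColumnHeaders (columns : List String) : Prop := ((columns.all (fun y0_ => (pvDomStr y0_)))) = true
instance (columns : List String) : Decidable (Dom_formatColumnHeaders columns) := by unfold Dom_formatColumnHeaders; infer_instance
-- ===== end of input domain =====

-- B builds the two rows by filtering (damage / non-damage comprehensions) and splicing the
-- Damage cell at the first damage index, instead of A's stateful two-loop scan; objective: simpler.

-- ===== PORT A =====
-- module constant dmgTypeSet = {'H','S','C','I'}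
def dmgTypeSet : PySem.Set String := PySem.Set.ofList ["H", "S", "C", "I"]

-- the body of A's second for-loop, with the constant Damage cell string d precomputed
def pvStepA (d : String) (st : List String × Bool) (column : String) : List String × Bool :=
  if PySem.Set.contains dmgTypeSet column then
    if st.2 = false then (st.1 ++ [d], true)
    else st              -- continue
  else (st.1 ++ ["rowspan=\"2\" |" ++ column], st.2)

def formatColumnHeaders (columns : List String) : String :=
  let dmgTypeList : List String := columns.foldl
    (fun acc column => if PySem.Set.contains dmgTypeSet column then acc ++ [column] else acc) []
  let d : String := "colspan=\"" ++ PySem.Int.toStr (dmgTypeList.length : Int) ++ "\" |Damage"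
  let st := columns.foldl (pvStepA d) ([], false)
  let columnHeader := "|-\n! " ++ PySem.Str.join "\n! " st.1
  columnHeader ++ ("\n|-\n!" ++ PySem.Str.join "\n!" dmgTypeList)

-- ===== PORT B =====
def formatColumnHeaders_alt (columns : List String) : String :=
  let dmg := columns.filter (fun c => PySem.Set.contains dmgTypeSet c)
  let rest := (columns.filter (fun c => !(PySem.Set.contains dmgTypeSet c))).map
    (fun c => "rowspan=\"2\" |" ++ c)
  let columnList :=
    if dmg ≠ [] then
      let k := columns.findIdx (fun c => PySem.Set.contains dmgTypeSet c)
      rest.take k ++ ["colspan=\"" ++ PySem.Int.toStr (dmg.length : Int) ++ "\" |Damage"] ++ rest.drop k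
    else rest
  "|-\n! " ++ PySem.Str.join "\n! " columnList ++ ("\n|-\n!" ++ PySem.Str.join "\n!" dmg)

-- ===== PRECONDITION & SPEC =====
def Spec_formatColumnHeaders (columns : List String) (out : String) : Prop := out = formatColumnHeaders_alt columns
instance (columns : List String) (out : String) : Decidable (Spec_formatColumnHeaders columns out) := by unfold Spec_formatColumnHeaders; infer_instance

-- ===== CLAIM (what is proved, stated in full; the proofs are below) =====
def Claim_equal_formatColumnHeaders : Prop := ∀ (columns : List String), Dom_formatColumnHeaders columns → Spec_formatColumnHeaders columns (formatColumnHeaders columns)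

-- ===== LEMMAS AND PROOFS =====

-- generic forms of the loop step and the splice, with the membership test and formatter abstract
def genStep (p : String → Bool) (g : String → String) (d : String)
    (st : List String × Bool) (c : String) : List String × Bool :=
  if p c then (if st.2 = false then (st.1 ++ [d], true) else st)
  else (st.1 ++ [g c], st.2)

theorem pvStepA_eq (d : String) :
    pvStepA d = genStep (fun c => PySem.Set.contains dmgTypeSet c)
      (fun c => "rowspan=\"2\" |" ++ c) d := rfl

def genSplice (p : String → Bool) (g : String → String) (d : String)
    (columns : List String) : List String :=
  let rest := (columns.filter (fun c => !(p c))).map g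
  if columns.filter p ≠ [] then
    rest.take (columns.findIdx p) ++ [d] ++ rest.drop (columns.findIdx p)
  else rest

theorem genFilter (p : String → Bool) (columns acc : List String) :
    columns.foldl (fun acc c => if p c then acc ++ [c] else acc) acc
      = acc ++ columns.filter p := by
  induction columns generalizing acc with
  | nil => simp
  | cons x xs ih =>
    cases h : p x <;> simp [List.filter_cons, h, ih]

theorem genSeen (p : String → Bool) (g : String → String) (d : String)
    (columns acc : List String) :
    columns.foldl (genStep p g d) (acc, true)
      = (acc ++ (columns.filter (fun c => !(p c))).map g, true) := by
  induction columns generalizing acc with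
  | nil => simp
  | cons x xs ih =>
    cases h : p x <;> simp [genStep, List.filter_cons, h, ih]

theorem genSpliceLoop (p : String → Bool) (g : String → String) (d : String)
    (columns acc : List String) :
    (columns.foldl (genStep p g d) (acc, false)).1 = acc ++ genSplice p g d columns := by
  induction columns generalizing acc with
  | nil => simp [genSplice]
  | cons x xs ih =>
    cases h : p x
    · simp only [List.foldl_cons, genStep, h, Bool.false_eq_true, if_false, ih]
      by_cases hne : xs.filter p = []
      · simp [genSplice, List.filter_cons, h, hne]
      · simp [genSplice, List.filter_cons, h, hne, List.findIdx_cons,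
          List.take_succ_cons, List.drop_succ_cons]
    · simp only [List.foldl_cons, genStep, h, if_true]
      rw [show ((acc, false).1 ++ [d], true) = (acc ++ [d], true) from rfl, genSeen]
      simp [genSplice, List.filter_cons, h, List.findIdx_cons]

-- ===== VERDICT (by name: the statement is the Claim_ definition above) =====
theorem formatColumnHeaders_spec : Claim_equal_formatColumnHeaders := by
  intro columns _
  show formatColumnHeaders columns = formatColumnHeaders_alt columns
  simp only [formatColumnHeaders, formatColumnHeaders_alt, pvStepA_eq]
  rw [genFilter, genSpliceLoop]
  simp only [List.nil_append, genSplice]
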